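-- pv_equiv track=rewrite | github.com/weiminggao/wangyi_competition | Code/bin/model/cascade_model_train_and_eval/evaluate_all.py | convert_psopred_to_wordsindex
-- ===== SOURCE A (Python) =====
-- def convert_psopred_to_wordsindex(pso_pred, postag, word_dict):#测试完毕
--     pso_indexs = []
--     pso_words = []
--     words_position = []
--     i = 0
--
--     while i < len(pso_pred):
--         if pso_pred[i] == 3:
--             word_position = []
--             word_position.append(i)
--             i = i + 1
--             while i < len(pso_pred) and pso_pred[i] != 3 and pso_pred[i] != 0:
--                 i = i + 1
--             word_position.append(i)
--             words_position.append(word_position)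
--         else:
--             i +=1
--
--     for word_position in words_position:
--         words = ''
--         pso_index = [0] * 5
--         for j, position in enumerate(range(word_position[0], word_position[1])):
--             words += postag[position]['word']
--             if postag[position]['word'] in word_dict and j < 5:
--                 pso_index[j] = word_dict[postag[position]['word']]
--         pso_indexs.append(pso_index)
--         pso_words.append(words)
--
--     return pso_words, pso_indexs
-- ===== SOURCE B (Python) =====
-- def convert_psopred_to_wordsindex(pso_pred, postag, word_dict):
--     # Single fused pass: start a word at each 3, build its string and its
--     # 5-slot index while scanning, never materialising boundary pairs.
--     pso_words = []
--     pso_indexs = []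
--     n = len(pso_pred)
--     i = 0
--     while i < n:
--         if pso_pred[i] == 3:
--             words = ''
--             pso_index = [0] * 5
--             j = 0
--             while i < n and (j == 0 or (pso_pred[i] != 3 and pso_pred[i] != 0)):
--                 w = postag[i]['word']
--                 words += w
--                 if w in word_dict and j < 5:
--                     pso_index[j] = word_dict[w]
--                 i += 1
--                 j += 1
--             pso_words.append(words)
--             pso_indexs.append(pso_index)
--         else:
--             i += 1
--     return pso_words, pso_indexs
-- ===== Notes on version B (the rewrite author's own statement) =====
-- stated objective: alternative
-- what changed: Replaces A's two-phase structure (collect all word boundary pairs into words_position, then re-scan each range indexing postag and word_dict up to three times per position) with one fused linear pass that, on seeing a 3, builds the word string and its 5-slot index in the same inner loop, caching each postag[i]['word'] lookup once and dropping the words_position intermediate entirely.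
import Mathlib
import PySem

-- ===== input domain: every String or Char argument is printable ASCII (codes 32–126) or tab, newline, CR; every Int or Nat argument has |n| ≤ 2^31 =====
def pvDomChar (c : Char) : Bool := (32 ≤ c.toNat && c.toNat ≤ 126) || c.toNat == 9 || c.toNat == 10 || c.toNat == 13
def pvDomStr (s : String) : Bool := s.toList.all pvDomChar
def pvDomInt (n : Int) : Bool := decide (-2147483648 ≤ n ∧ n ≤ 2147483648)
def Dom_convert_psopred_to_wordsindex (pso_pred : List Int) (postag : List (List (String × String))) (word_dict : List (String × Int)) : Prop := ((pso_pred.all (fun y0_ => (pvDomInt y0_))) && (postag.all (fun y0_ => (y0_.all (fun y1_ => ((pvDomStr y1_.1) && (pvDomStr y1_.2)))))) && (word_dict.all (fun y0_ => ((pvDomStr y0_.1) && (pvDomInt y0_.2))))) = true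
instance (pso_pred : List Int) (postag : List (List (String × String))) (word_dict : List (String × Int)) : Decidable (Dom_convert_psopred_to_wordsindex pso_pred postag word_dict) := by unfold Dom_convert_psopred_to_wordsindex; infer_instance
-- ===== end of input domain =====

-- B fuses A's two phases into one linear pass: the word string and its 5-slot index
-- are built while scanning, with no words_position intermediate and each
-- postag[i]['word'] looked up once (an alternative decomposition of the same cost).

-- Shared indexing/lookup expressions (the literal Python subexpressions
-- postag[p]['word'] and the word_dict membership/lookup; exact via PySem):
def pvWordAt (postag : List (List (String × String))) (p : Int) : String :=
  ((PySem.Dict.ofList (PySem.List.pyGetD postag p [])).get? "word").getD ""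

def pvVal (word_dict : List (String × Int)) (w : String) : Option Int :=
  (PySem.Dict.ofList word_dict).get? w

-- ===== PORT A =====
-- inner while: advance i while pso_pred[i] != 3 and != 0; returns (final i, rest of list)
def skipA : List Int → Int → Int × List Int
  | [], i => (i, [])
  | x :: r, i => if x ≠ 3 ∧ x ≠ 0 then skipA r (i + 1) else (i, x :: r)

theorem skipA_len (r : List Int) (i : Int) : (skipA r i).2.length ≤ r.length := by
  induction r generalizing i with
  | nil => simp [skipA]
  | cons x t ih =>
    simp only [skipA]
    split_ifs with h
    · exact Nat.le_succ_of_le (ih (i + 1))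
    · simp

-- outer while of phase 1: collect the (start, end) boundary pairs
def scanA : List Int → Int → List (Int × Int)
  | [], _ => []
  | x :: r, i =>
    if x = 3 then
      let p := skipA r (i + 1)
      (i, p.1) :: scanA p.2 p.1
    else scanA r (i + 1)
termination_by l _ => l.length
decreasing_by
  · exact Nat.lt_succ_of_le (skipA_len r (i + 1))
  · simp

-- body of phase 2's 'for j, position in enumerate(range(a, b))'
def stepA (postag : List (List (String × String))) (word_dict : List (String × Int))
    (st : String × List Int) (ji : Int × Int) : String × List Int :=
  let s := pvWordAt postag ji.2
  (st.1 ++ s,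
   if (pvVal word_dict s).isSome ∧ ji.1 < 5
   then PySem.List.pySetD st.2 ji.1 ((pvVal word_dict s).getD 0)
   else st.2)

def convert_psopred_to_wordsindex (pso_pred : List Int) (postag : List (List (String × String))) (word_dict : List (String × Int)) : List String × List (List Int) :=
  let words_position := scanA pso_pred 0
  words_position.foldl
    (fun acc wp =>
      let wi := (PySem.List.enumerate (PySem.List.pyRange wp.1 wp.2 1) 0).foldl
        (stepA postag word_dict) ("", [0, 0, 0, 0, 0])
      (acc.1 ++ [wi.1], acc.2 ++ [wi.2]))
    (([] : List String), ([] : List (List Int)))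

-- ===== PORT B =====
-- B's inner while: consumes the whole word (j = 0 forces the starting position in),
-- building the string and the 5-slot index as it goes; returns (word, index, rest, next i)
def segB (postag : List (List (String × String))) (word_dict : List (String × Int)) :
    List Int → Int → Nat → String → List Int → String × List Int × List Int × Int
  | [], i, _, w, idx => (w, idx, [], i)
  | x :: r, i, j, w, idx =>
    if j = 0 ∨ (x ≠ 3 ∧ x ≠ 0) then
      let s := pvWordAt postag i
      segB postag word_dict r (i + 1) (j + 1) (w ++ s)
        (if (pvVal word_dict s).isSome ∧ j < 5
         then idx.set j ((pvVal word_dict s).getD 0) else idx)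
    else (w, idx, x :: r, i)

theorem segB_len (postag : List (List (String × String))) (word_dict : List (String × Int))
    (l : List Int) (i : Int) (j : Nat) (w : String) (idx : List Int) :
    (segB postag word_dict l i j w idx).2.2.1.length ≤ l.length := by
  induction l generalizing i j w idx with
  | nil => simp [segB]
  | cons x t ih =>
    simp only [segB]
    split_ifs with h h2
    · exact Nat.le_succ_of_le (ih _ _ _ _)
    · exact Nat.le_succ_of_le (ih _ _ _ _)
    · simp

theorem segB_cons_zero_len (postag : List (List (String × String))) (word_dict : List (String × Int))
    (x : Int) (r : List Int) (i : Int) (w : String) (idx : List Int) :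
    (segB postag word_dict (x :: r) i 0 w idx).2.2.1.length < (x :: r).length := by
  simp only [segB]
  exact Nat.lt_succ_of_le (segB_len _ _ _ _ _ _ _)

-- B's single outer pass
def goB (postag : List (List (String × String))) (word_dict : List (String × Int)) :
    List Int → Int → List String × List (List Int)
  | [], _ => ([], [])
  | x :: r, i =>
    if x = 3 then
      let q := segB postag word_dict (x :: r) i 0 "" [0, 0, 0, 0, 0]
      let rest := goB postag word_dict q.2.2.1 q.2.2.2
      (q.1 :: rest.1, q.2.1 :: rest.2)
    else goB postag word_dict r (i + 1)
termination_by l _ => l.length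
decreasing_by
  · exact segB_cons_zero_len postag word_dict x r i "" [0, 0, 0, 0, 0]
  · simp

def convert_psopred_to_wordsindex_alt (pso_pred : List Int) (postag : List (List (String × String))) (word_dict : List (String × Int)) : List String × List (List Int) :=
  goB postag word_dict pso_pred 0

-- ===== PRECONDITION & SPEC =====
-- position p is read by A: it starts a word (value 3) or lies inside one
def pvInWord (pso : List Int) (p : Nat) : Bool :=
  pso[p]? == some 3 ||
  (List.range p).any (fun s =>
    pso[s]? == some 3 &&
    (List.range (p + 1)).all (fun t =>
      !(decide (s < t)) || (pso[t]? != some 3 && pso[t]? != some 0)))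

-- Pre_ excludes exactly the inputs where A raises: at some position inside a word
-- postag is too short (IndexError) or its dict lacks the key 'word' (KeyError).
def Pre_convert_psopred_to_wordsindex (pso_pred : List Int) (postag : List (List (String × String))) (word_dict : List (String × Int)) : Prop :=
  ∀ p ∈ List.range pso_pred.length, pvInWord pso_pred p →
    p < postag.length ∧ ((PySem.Dict.ofList (postag.getD p [])).get? "word").isSome

instance (pso_pred : List Int) (postag : List (List (String × String))) (word_dict : List (String × Int)) : Decidable (Pre_convert_psopred_to_wordsindex pso_pred postag word_dict) := by unfold Pre_convert_psopred_to_wordsindex; infer_instance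

def pvWitness_convert_psopred_to_wordsindex : List Int × (List (List (String × String))) × (List (String × Int)) :=
  ([3, 1, 0], [[("word", "ab")], [("word", "cd")], [("word", "ef")]], [("ab", 7)])

def Spec_convert_psopred_to_wordsindex (pso_pred : List Int) (postag : List (List (String × String))) (word_dict : List (String × Int)) (out : List String × List (List Int)) : Prop := out = convert_psopred_to_wordsindex_alt pso_pred postag word_dict
instance (pso_pred : List Int) (postag : List (List (String × String))) (word_dict : List (String × Int)) (out : List String × List (List Int)) : Decidable (Spec_convert_psopred_to_wordsindex pso_pred postag word_dict out) := by unfold Spec_convert_psopred_to_wordsindex; infer_instance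

-- ===== CLAIM (what is proved, stated in full; the proofs are below) =====
def Claim_equal_convert_psopred_to_wordsindex : Prop := ∀ (pso_pred : List Int) (postag : List (List (String × String))) (word_dict : List (String × Int)), Dom_convert_psopred_to_wordsindex pso_pred postag word_dict → Pre_convert_psopred_to_wordsindex pso_pred postag word_dict → Spec_convert_psopred_to_wordsindex pso_pred postag word_dict (convert_psopred_to_wordsindex pso_pred postag word_dict)

-- ===== LEMMAS AND PROOFS =====

theorem skipA_ge (r : List Int) (i : Int) : i ≤ (skipA r i).1 := by
  induction r generalizing i with
  | nil => simp [skipA]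
  | cons x t ih =>
    simp only [skipA]
    split_ifs with h
    · exact le_trans (by omega) (ih (i + 1))
    · simp

-- B's inner while (from j ≥ 1 on) computes exactly A's phase-2 fold over the
-- enumerated range up to the boundary that A's phase-1 inner while finds.
theorem segB_eq (postag : List (List (String × String))) (word_dict : List (String × Int))
    (r : List Int) (i : Int) (j : Nat) (w : String) (idx : List Int) (hj : 1 ≤ j) :
    segB postag word_dict r i j w idx =
      (let st := (PySem.List.enumerate (PySem.List.pyRange i (skipA r i).1 1) (j : Int)).foldl
                   (stepA postag word_dict) (w, idx)
       (st.1, st.2, (skipA r i).2, (skipA r i).1)) := by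
  induction r generalizing i j w idx with
  | nil =>
    simp [segB, skipA, PySem.List.pyRange_one_eq_nil (le_refl i)]
  | cons x t ih =>
    by_cases hx : x ≠ 3 ∧ x ≠ 0
    · have hcond : j = 0 ∨ (x ≠ 3 ∧ x ≠ 0) := Or.inr hx
      have hskip : skipA (x :: t) i = skipA t (i + 1) := by simp [skipA, hx]
      have hge : i + 1 ≤ (skipA t (i + 1)).1 := skipA_ge t (i + 1)
      have hcons : PySem.List.pyRange i (skipA t (i + 1)).1 1 =
          i :: PySem.List.pyRange (i + 1) (skipA t (i + 1)).1 1 :=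
        PySem.List.pyRange_one_cons (by omega)
      simp only [segB, if_pos hcond, hskip, hcons, PySem.List.enumerate_cons, List.foldl_cons]
      rw [ih (i + 1) (j + 1) _ _ (by omega)]
      have hstep : stepA postag word_dict (w, idx) ((j : Int), i) =
          (w ++ pvWordAt postag i,
           if (pvVal word_dict (pvWordAt postag i)).isSome ∧ j < 5
           then idx.set j ((pvVal word_dict (pvWordAt postag i)).getD 0) else idx) := by
        simp only [stepA]
        congr 1
        split_ifs with h1 h2 h2
        · simp [PySem.List.pySetD_natCast]
        · exact absurd ⟨h1.1, by exact_mod_cast h1.2⟩ h2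
        · exact absurd ⟨h2.1, by exact_mod_cast h2.2⟩ h1
        · rfl
      rw [hstep]
      norm_num [Int.add_comm]
    · have hx' : x = 3 ∨ x = 0 := by tauto
      have hskip : skipA (x :: t) i = (i, x :: t) := by
        simp only [skipA, if_neg hx]
      have hcond : ¬ (j = 0 ∨ (x ≠ 3 ∧ x ≠ 0)) := by
        simp only [not_or]
        exact ⟨by omega, hx⟩
      simp [segB, if_neg hcond, hskip, PySem.List.pyRange_one_eq_nil (le_refl i)]

-- B's outer pass equals: map A's phase-2 word computation over A's phase-1 boundary list.
theorem goB_eq (postag : List (List (String × String))) (word_dict : List (String × Int)) :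
    ∀ (n : Nat) (l : List Int), l.length ≤ n → ∀ (i : Int),
    goB postag word_dict l i =
      ((scanA l i).map (fun wp =>
         ((PySem.List.enumerate (PySem.List.pyRange wp.1 wp.2 1) 0).foldl
            (stepA postag word_dict) ("", [0, 0, 0, 0, 0])).1),
       (scanA l i).map (fun wp =>
         ((PySem.List.enumerate (PySem.List.pyRange wp.1 wp.2 1) 0).foldl
            (stepA postag word_dict) ("", [0, 0, 0, 0, 0])).2)) := by
  intro n
  induction n with
  | zero =>
    intro l hl i
    have : l = [] := List.eq_nil_of_length_eq_zero (Nat.le_zero.mp hl)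
    subst this
    simp [goB, scanA]
  | succ n ih =>
    intro l hl i
    match l with
    | [] => simp [goB, scanA]
    | x :: r =>
      by_cases hx : x = 3
      · subst hx
        have hge : i + 1 ≤ (skipA r (i + 1)).1 := skipA_ge r (i + 1)
        -- unfold the first step of B's inner while (j = 0, so the start is consumed)
        have hseg : segB postag word_dict (3 :: r) i 0 "" [0, 0, 0, 0, 0] =
            segB postag word_dict r (i + 1) 1 ("" ++ pvWordAt postag i)
              (if (pvVal word_dict (pvWordAt postag i)).isSome ∧ 0 < 5
               then [0, 0, 0, 0, 0].set 0 ((pvVal word_dict (pvWordAt postag i)).getD 0)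
               else [0, 0, 0, 0, 0]) := by
          norm_num [segB]
        -- A's phase-2 fold over [i, e) opens with the same first step
        have hstep0 : stepA postag word_dict ("", [0, 0, 0, 0, 0]) ((0 : Int), i) =
            ("" ++ pvWordAt postag i,
             if (pvVal word_dict (pvWordAt postag i)).isSome ∧ 0 < 5
             then [0, 0, 0, 0, 0].set 0 ((pvVal word_dict (pvWordAt postag i)).getD 0)
             else [0, 0, 0, 0, 0]) := by
          simp only [stepA]
          congr 1
          split_ifs with h1 h2 h2
          · have h0 : ((0 : Int)) = ((0 : Nat) : Int) := rfl
            rw [h0, PySem.List.pySetD_natCast]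
          · exact absurd ⟨h1.1, by norm_num⟩ h2
          · exact absurd ⟨h2.1, by norm_num⟩ h1
          · rfl
        have hA : (PySem.List.enumerate (PySem.List.pyRange i (skipA r (i + 1)).1 1) 0).foldl
              (stepA postag word_dict) ("", [0, 0, 0, 0, 0]) =
            (PySem.List.enumerate (PySem.List.pyRange (i + 1) (skipA r (i + 1)).1 1)
                (((1 : Nat) : Int))).foldl
              (stepA postag word_dict)
              ("" ++ pvWordAt postag i,
               if (pvVal word_dict (pvWordAt postag i)).isSome ∧ 0 < 5
               then [0, 0, 0, 0, 0].set 0 ((pvVal word_dict (pvWordAt postag i)).getD 0)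
               else [0, 0, 0, 0, 0]) := by
          rw [PySem.List.pyRange_one_cons (by omega), PySem.List.enumerate_cons,
            List.foldl_cons, hstep0]
          norm_num
        have hlen : (skipA r (i + 1)).2.length ≤ n := by
          have h1 := skipA_len r (i + 1)
          have hr : r.length ≤ n := by simpa using Nat.succ_le_succ_iff.mp hl
          omega
        simp only [goB, scanA, if_true, List.map_cons,
          hseg, segB_eq postag word_dict r (i + 1) 1 _ _ (le_refl 1)]
        rw [ih _ hlen ((skipA r (i + 1)).1), hA]
      · have hscan : scanA (x :: r) i = scanA r (i + 1) := by
          simp [scanA, hx]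
        have hgo : goB postag word_dict (x :: r) i = goB postag word_dict r (i + 1) := by
          simp [goB, hx]
        rw [hscan, hgo, ih r (by simpa using Nat.succ_le_succ_iff.mp hl) (i + 1)]

-- A's output loop (two appends per word) builds exactly the pair of maps.
theorem foldl_pair_append {α β γ : Type} (f : α → β) (g : α → γ) :
    ∀ (L : List α) (as : List β) (bs : List γ),
    L.foldl (fun acc x => (acc.1 ++ [f x], acc.2 ++ [g x])) (as, bs) =
      (as ++ L.map f, bs ++ L.map g) := by
  intro L
  induction L with
  | nil => simp
  | cons x t ih => intro as bs; simp [ih]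

-- ===== VERDICT (by name: the statement is the Claim_ definition above) =====
theorem convert_psopred_to_wordsindex_spec : Claim_equal_convert_psopred_to_wordsindex := by
  intro pso_pred postag word_dict _ _
  unfold Spec_convert_psopred_to_wordsindex
  unfold convert_psopred_to_wordsindex convert_psopred_to_wordsindex_alt
  rw [goB_eq postag word_dict pso_pred.length pso_pred (le_refl _) 0]
  rw [foldl_pair_append
    (fun wp => ((PySem.List.enumerate (PySem.List.pyRange wp.1 wp.2 1) 0).foldl
      (stepA postag word_dict) ("", [0, 0, 0, 0, 0])).1)
    (fun wp => ((PySem.List.enumerate (PySem.List.pyRange wp.1 wp.2 1) 0).foldl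
      (stepA postag word_dict) ("", [0, 0, 0, 0, 0])).2)
    (scanA pso_pred 0) [] []]
  simp
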